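-- pv_equiv track=rewrite | github.com/hdser/pyfinder | src/graph/flow/utils.py | verify_flow_conservation
-- ===== SOURCE A (Python) =====
-- from typing import Dict, List, Tuple, Optional
--
-- def verify_flow_conservation(flow_dict: Dict[str, Dict[str, int]], source: str, sink: str) -> bool:
--     """Verify flow conservation at intermediate nodes."""
--     for node in flow_dict:
--         if node not in (source, sink):
--             in_flow = sum(flows.get(node, 0) for flows in flow_dict.values())
--             out_flow = sum(flow_dict.get(node, {}).values())
--             if abs(in_flow - out_flow) > 1e-10:  # Allow for small numerical errors
--                 return False
--     return True
-- ===== SOURCE B (Python) =====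
-- def verify_flow_conservation(flow_dict, source, sink):
--     """Verify flow conservation at intermediate nodes (single pass over edges)."""
--     in_flows = {}
--     for flows in flow_dict.values():
--         for node, f in flows.items():
--             in_flows[node] = in_flows.get(node, 0) + f
--     for node, flows in flow_dict.items():
--         if node != source and node != sink:
--             if in_flows.get(node, 0) != sum(flows.values()):
--                 return False
--     return True
-- ===== Notes on version B (the rewrite author's own statement) =====
-- stated objective: alternative
-- what changed: B replaces A's per-intermediate-node rescan of every adjacency dict (recomputing the whole in-flow sum for each node) with a single pass over all edges that accumulates per-node in-flows in a dict, followed by one comparison pass; it trades A's repeated C-level sums for one explicit accumulation loop.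
import Mathlib
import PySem

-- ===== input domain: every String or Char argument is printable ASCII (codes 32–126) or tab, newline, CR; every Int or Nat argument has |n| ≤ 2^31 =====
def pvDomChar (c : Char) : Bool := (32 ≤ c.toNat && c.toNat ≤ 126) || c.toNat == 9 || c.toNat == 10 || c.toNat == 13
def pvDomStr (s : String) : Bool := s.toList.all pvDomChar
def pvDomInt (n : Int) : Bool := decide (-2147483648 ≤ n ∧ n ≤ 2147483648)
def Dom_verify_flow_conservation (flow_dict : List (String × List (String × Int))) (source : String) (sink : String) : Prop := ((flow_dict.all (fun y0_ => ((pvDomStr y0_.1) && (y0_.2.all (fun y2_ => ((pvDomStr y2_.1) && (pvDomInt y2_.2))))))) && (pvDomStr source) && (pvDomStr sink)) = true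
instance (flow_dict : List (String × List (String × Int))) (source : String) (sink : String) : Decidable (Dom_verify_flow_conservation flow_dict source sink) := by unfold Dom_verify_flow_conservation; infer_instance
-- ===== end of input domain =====

-- B replaces A's per-node rescan of every adjacency dict with one pass accumulating in-flows in a dict, then a comparison pass (objective: alternative algorithm).


-- ===== PORT A =====
-- flows.get(node, 0): first-match lookup in the association list (exact for a dict, whose keys are unique)
def pvGetIntD (m : List (String × Int)) (k : String) (dflt : Int) : Int :=
  match m.find? (fun p => p.1 == k) with
  | some p => p.2
  | none => dflt

-- flow_dict.get(node, {})
def pvGetRowD (fd : List (String × List (String × Int))) (k : String) : List (String × Int) :=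
  match fd.find? (fun p => p.1 == k) with
  | some p => p.2
  | none => []

-- the 'for node in flow_dict' loop; 'abs(in_flow - out_flow) > 1e-10' on Ints is exactly 'in_flow ≠ out_flow' (|difference| is 0 or ≥ 1)
def vfcLoopA (fd : List (String × List (String × Int))) (source sink : String) : List (String × List (String × Int)) → Bool
  | [] => true
  | (node, _) :: rest =>
    if node ≠ source ∧ node ≠ sink then
      let in_flow := (fd.map (fun p => pvGetIntD p.2 node 0)).sum
      let out_flow := ((pvGetRowD fd node).map Prod.snd).sum
      if in_flow ≠ out_flow then false else vfcLoopA fd source sink rest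
    else vfcLoopA fd source sink rest

def verify_flow_conservation (flow_dict : List (String × List (String × Int))) (source : String) (sink : String) : Bool :=
  vfcLoopA flow_dict source sink flow_dict

-- ===== PORT B =====
-- one pass over all edges: in_flows[node] = in_flows.get(node, 0) + f
def pvBuildIn (fd : List (String × List (String × Int))) : PySem.Dict String Int :=
  fd.foldl (fun d p => p.2.foldl (fun d q => d.modify q.1 0 (· + q.2)) d) PySem.Dict.empty

-- second loop: compare accumulated in-flow to out-flow at each intermediate node
def vfcLoopB (inF : PySem.Dict String Int) (source sink : String) : List (String × List (String × Int)) → Bool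
  | [] => true
  | (node, flows) :: rest =>
    if node ≠ source ∧ node ≠ sink then
      if inF.getD node 0 ≠ (flows.map Prod.snd).sum then false
      else vfcLoopB inF source sink rest
    else vfcLoopB inF source sink rest

def verify_flow_conservation_alt (flow_dict : List (String × List (String × Int))) (source : String) (sink : String) : Bool :=
  vfcLoopB (pvBuildIn flow_dict) source sink flow_dict

-- ===== PRECONDITION & SPEC =====
-- Pre_ only requires the association lists to actually represent Python dicts (unique keys at both levels);
-- A's argument is a dict, which can never carry duplicate keys, so no input of A is excluded.
def Pre_verify_flow_conservation (flow_dict : List (String × List (String × Int))) (source : String) (sink : String) : Prop :=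
  (flow_dict.map Prod.fst).Nodup ∧ ∀ p ∈ flow_dict, (p.2.map Prod.fst).Nodup
instance (flow_dict : List (String × List (String × Int))) (source : String) (sink : String) : Decidable (Pre_verify_flow_conservation flow_dict source sink) := by unfold Pre_verify_flow_conservation; infer_instance
def pvWitness_verify_flow_conservation : (List (String × List (String × Int))) × String × String :=
  ([("s", [("m", 3)]), ("m", [("t", 3)]), ("t", [])], "s", "t")

def Spec_verify_flow_conservation (flow_dict : List (String × List (String × Int))) (source : String) (sink : String) (out : Bool) : Prop := out = verify_flow_conservation_alt flow_dict source sink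
instance (flow_dict : List (String × List (String × Int))) (source : String) (sink : String) (out : Bool) : Decidable (Spec_verify_flow_conservation flow_dict source sink out) := by unfold Spec_verify_flow_conservation; infer_instance

-- ===== CLAIM (what is proved, stated in full; the proofs are below) =====
def Claim_equal_verify_flow_conservation : Prop := ∀ (flow_dict : List (String × List (String × Int))) (source : String) (sink : String), Dom_verify_flow_conservation flow_dict source sink → Pre_verify_flow_conservation flow_dict source sink → Spec_verify_flow_conservation flow_dict source sink (verify_flow_conservation flow_dict source sink)

-- ===== LEMMAS AND PROOFS =====

-- accumulating one row into the dict adds exactly the matching values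
theorem getD_foldl_modify_add (l : List (String × Int)) (d : PySem.Dict String Int) (v : String) :
    (l.foldl (fun d q => d.modify q.1 0 (· + q.2)) d).getD v 0
      = d.getD v 0 + ((l.filter (fun q => q.1 == v)).map Prod.snd).sum := by
  induction l generalizing d with
  | nil => simp
  | cons q rest ih =>
    simp only [List.foldl_cons, ih, List.filter_cons]
    by_cases h : q.1 = v
    · simp [h, add_assoc]
    · simp [h, PySem.Dict.getD_modify, Ne.symm h]

-- under unique inner keys, the filtered sum is the dict lookup flows.get(v, 0)
theorem filter_sum_eq_getIntD (l : List (String × Int)) (v : String) (h : (l.map Prod.fst).Nodup) :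
    ((l.filter (fun q => q.1 == v)).map Prod.snd).sum = pvGetIntD l v 0 := by
  induction l with
  | nil => simp [pvGetIntD]
  | cons q rest ih =>
    simp only [List.map_cons, List.nodup_cons] at h
    simp only [List.filter_cons, pvGetIntD, List.find?_cons]
    by_cases hq : q.1 = v
    · have : ∀ r ∈ rest, ¬ (r.1 == v) = true := by
        intro r hr hb
        exact h.1 (by rw [hq, ← (beq_iff_eq).mp hb]; exact List.mem_map_of_mem hr)
      simp only [hq, beq_self_eq_true]
      have hfil : rest.filter (fun q => q.1 == v) = [] :=
        List.filter_eq_nil_iff.mpr this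
      simp [hfil]
    · have hbq : (q.1 == v) = false := beq_eq_false_iff_ne.mpr hq
      simpa [hbq, pvGetIntD] using ih h.2

-- the accumulated in-flow at v equals A's rescan sum
theorem buildIn_getD (fd : List (String × List (String × Int))) (v : String)
    (h : ∀ p ∈ fd, (p.2.map Prod.fst).Nodup) :
    (pvBuildIn fd).getD v 0 = (fd.map (fun p => pvGetIntD p.2 v 0)).sum := by
  unfold pvBuildIn
  suffices H : ∀ (l : List (String × List (String × Int))) (d : PySem.Dict String Int),
      (∀ p ∈ l, (p.2.map Prod.fst).Nodup) →
      (l.foldl (fun d p => p.2.foldl (fun d q => d.modify q.1 0 (· + q.2)) d) d).getD v 0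
        = d.getD v 0 + (l.map (fun p => pvGetIntD p.2 v 0)).sum by
    simpa using H fd PySem.Dict.empty h
  intro l
  induction l with
  | nil => simp
  | cons p rest ih =>
    intro d hl
    simp only [List.foldl_cons, List.map_cons, List.sum_cons]
    rw [ih _ (fun r hr => hl r (List.mem_cons_of_mem _ hr)), getD_foldl_modify_add,
        filter_sum_eq_getIntD _ _ (hl p (List.mem_cons_self ..))]
    ring

-- under unique outer keys, flow_dict.get(node, {}) for an entry (node, flows) is flows itself
theorem getRowD_of_mem (fd : List (String × List (String × Int))) (node : String)
    (flows : List (String × Int)) (hmem : (node, flows) ∈ fd) (h : (fd.map Prod.fst).Nodup) :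
    pvGetRowD fd node = flows := by
  induction fd with
  | nil => cases hmem
  | cons p rest ih =>
    simp only [List.map_cons, List.nodup_cons] at h
    rcases List.mem_cons.mp hmem with heq | hmem'
    · simp [pvGetRowD, ← heq]
    · have hne : p.1 ≠ node := by
        intro hp
        exact h.1 (hp ▸ (List.mem_map_of_mem hmem' : (node, flows).1 ∈ rest.map Prod.fst))
      have : (p.1 == node) = false := beq_eq_false_iff_ne.mpr hne
      simpa [pvGetRowD, List.find?_cons, this] using ih hmem' h.2

theorem loops_agree (fd : List (String × List (String × Int))) (source sink : String)
    (hout : (fd.map Prod.fst).Nodup) (hin : ∀ p ∈ fd, (p.2.map Prod.fst).Nodup) :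
    ∀ l : List (String × List (String × Int)), (∀ p ∈ l, p ∈ fd) →
      vfcLoopA fd source sink l = vfcLoopB (pvBuildIn fd) source sink l := by
  intro l
  induction l with
  | nil => intro _; rfl
  | cons p rest ih =>
    intro hl
    obtain ⟨node, flows⟩ := p
    have hmem : (node, flows) ∈ fd := hl _ (List.mem_cons_self ..)
    have hrest := ih (fun r hr => hl r (List.mem_cons_of_mem _ hr))
    simp only [vfcLoopA, vfcLoopB]
    rw [buildIn_getD fd node hin, getRowD_of_mem fd node flows hmem hout, hrest]

-- ===== VERDICT (by name: the statement is the Claim_ definition above) =====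
theorem verify_flow_conservation_spec : Claim_equal_verify_flow_conservation := by
  intro fd source sink _ hpre
  unfold Spec_verify_flow_conservation verify_flow_conservation verify_flow_conservation_alt
  exact loops_agree fd source sink hpre.1 hpre.2 fd (fun _ h => h)
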